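-- pv_equiv track=rewrite | github.com/pypi-data/pypi-mirror-400 | packages/rdf-construct/rdf_construct-0.4.0.tar.gz/rdf_construct-0.4.0/src/rdf_construct/cli.py | _expand_localise_property
-- ===== SOURCE A (Python) =====
-- def _expand_localise_property(prop: str) -> str:
--     """Expand a CURIE to full URI for localise commands."""
--     prefixes = {
--         "rdfs:": "http://www.w3.org/2000/01/rdf-schema#",
--         "skos:": "http://www.w3.org/2004/02/skos/core#",
--         "owl:": "http://www.w3.org/2002/07/owl#",
--         "rdf:": "http://www.w3.org/1999/02/22-rdf-syntax-ns#",
--         "dc:": "http://purl.org/dc/elements/1.1/",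
--         "dcterms:": "http://purl.org/dc/terms/",
--     }
--
--     for prefix, namespace in prefixes.items():
--         if prop.startswith(prefix):
--             return namespace + prop[len(prefix):]
--
--     return prop
-- ===== SOURCE B (Python) =====
-- def _expand_localise_property(prop: str) -> str:
--     """Expand a CURIE to full URI for localise commands."""
--     prefixes = {
--         "rdfs:": "http://www.w3.org/2000/01/rdf-schema#",
--         "skos:": "http://www.w3.org/2004/02/skos/core#",
--         "owl:": "http://www.w3.org/2002/07/owl#",
--         "rdf:": "http://www.w3.org/1999/02/22-rdf-syntax-ns#",
--         "dc:": "http://purl.org/dc/elements/1.1/",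
--         "dcterms:": "http://purl.org/dc/terms/",
--     }
--
--     prefix, sep, rest = prop.partition(":")
--     if sep:
--         namespace = prefixes.get(prefix + ":")
--         if namespace is not None:
--             return namespace + rest
--     return prop
-- ===== Notes on version B (the rewrite author's own statement) =====
-- stated objective: idiomatic
-- what changed: Replaces the linear scan over dict items with startswith probes by a single str.partition at the first colon followed by one O(1) dict lookup of prefix+':'.
import Mathlib
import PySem

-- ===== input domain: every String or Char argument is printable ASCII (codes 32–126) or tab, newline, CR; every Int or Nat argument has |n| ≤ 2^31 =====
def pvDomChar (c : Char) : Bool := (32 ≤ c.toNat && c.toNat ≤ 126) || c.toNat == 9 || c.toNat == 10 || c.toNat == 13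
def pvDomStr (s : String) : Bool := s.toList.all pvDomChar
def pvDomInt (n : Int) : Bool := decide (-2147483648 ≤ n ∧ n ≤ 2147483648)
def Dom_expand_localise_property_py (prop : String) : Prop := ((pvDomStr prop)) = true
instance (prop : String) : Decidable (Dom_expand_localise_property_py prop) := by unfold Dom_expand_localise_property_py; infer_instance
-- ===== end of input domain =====

-- B replaces A's startswith-scan over the prefix dict by one partition at the first colon plus a single dict lookup (idiomatic; return value only).


-- the shared literal dict of CURIE prefixes (insertion order as in the Python source)
def pvPrefixes : PySem.Dict String String := PySem.Dict.mk
  [ ("rdfs:", "http://www.w3.org/2000/01/rdf-schema#"),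
    ("skos:", "http://www.w3.org/2004/02/skos/core#"),
    ("owl:", "http://www.w3.org/2002/07/owl#"),
    ("rdf:", "http://www.w3.org/1999/02/22-rdf-syntax-ns#"),
    ("dc:", "http://purl.org/dc/elements/1.1/"),
    ("dcterms:", "http://purl.org/dc/terms/") ]

-- ===== PORT A =====
-- 'for prefix, namespace in prefixes.items(): if prop.startswith(prefix): return namespace + prop[len(prefix):]'
-- (Python '+' on strings is list-append on the char lists; exact)
def pvExpandLoop (items : List (String × String)) (prop : String) : String :=
  match items with
  | [] => prop
  | (pfx, ns) :: rest =>
    if PySem.Str.startswith prop pfx then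
      String.ofList (ns.toList ++ (PySem.Str.slice prop (some (PySem.Str.len pfx)) none).toList)
    else pvExpandLoop rest prop

def expand_localise_property_py (prop : String) : String :=
  pvExpandLoop pvPrefixes.items prop

-- ===== PORT B =====
-- 'prefix, sep, rest = prop.partition(":")': str.partition splits at the FIRST colon;
-- exact as List.span on the char list (the second span component is empty exactly when no colon was found).
def expand_localise_property_py_alt (prop : String) : String :=
  let parts := prop.toList.span (· ≠ ':')
  match parts.2 with
  | [] => prop
  | _ :: rest =>
    match PySem.Dict.get? pvPrefixes (String.ofList (parts.1 ++ [':'])) with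
    | some ns => String.ofList (ns.toList ++ rest)
    | none => prop

-- ===== PRECONDITION & SPEC =====
def Spec_expand_localise_property_py (prop : String) (out : String) : Prop := out = expand_localise_property_py_alt prop
instance (prop : String) (out : String) : Decidable (Spec_expand_localise_property_py prop out) := by unfold Spec_expand_localise_property_py; infer_instance

-- ===== CLAIM (what is proved, stated in full; the proofs are below) =====
def Claim_equal_expand_localise_property_py : Prop := ∀ (prop : String), Dom_expand_localise_property_py prop → Spec_expand_localise_property_py prop (expand_localise_property_py prop)

-- ===== LEMMAS AND PROOFS =====

-- splitting a list known to be <colon-free prefix> ++ ':' :: tail at the first colon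
lemma pv_span_aux (p t : List Char) (hp : ':' ∉ p) :
    (p ++ ':' :: t).takeWhile (· ≠ ':') = p ∧ (p ++ ':' :: t).dropWhile (· ≠ ':') = ':' :: t := by
  induction p with
  | nil => simp
  | cons a p ih =>
    have ha : a ≠ ':' := by intro e; exact hp (e ▸ List.mem_cons_self)
    have h2 := ih (fun m => hp (List.mem_cons_of_mem a m))
    simp only [List.cons_append, List.takeWhile_cons, List.dropWhile_cons]
    simp at h2
    simp [ha, h2.1, h2.2]

-- prop.startswith(p ++ ":") for a colon-free p, characterised through the first-colon split
lemma pv_startswith_colon_iff (cs p : List Char) (hp : ':' ∉ p) :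
    PySem.Chars.startswith cs (p ++ [':']) = true ↔
      cs.takeWhile (· ≠ ':') = p ∧ cs.dropWhile (· ≠ ':') ≠ [] := by
  rw [PySem.Chars.startswith_iff]
  constructor
  · rintro ⟨t, ht⟩
    have h2 := pv_span_aux p t hp
    rw [← ht, List.append_assoc, List.singleton_append]
    exact ⟨h2.1, by rw [h2.2]; simp⟩
  · rintro ⟨h1, h2⟩
    rcases hd : cs.dropWhile (· ≠ ':') with _ | ⟨c, t⟩
    · exact absurd hd h2
    · have hc : c = ':' := by
        have h3 := List.head?_dropWhile_not (fun x => decide (x ≠ ':')) cs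
        rw [hd] at h3; simpa using h3
      refine ⟨t, ?_⟩
      have := List.takeWhile_append_dropWhile (p := fun x => decide (x ≠ ':')) (l := cs)
      rw [h1, hd, hc] at this
      rw [List.append_assoc, List.singleton_append]; exact this

-- the startswith test, as a boolean equality on the pre-colon segment (when a colon exists)
lemma pv_startswith_eq_beq (cs p : List Char) (hp : ':' ∉ p)
    (hne : cs.dropWhile (· ≠ ':') ≠ []) :
    PySem.Chars.startswith cs (p ++ [':']) = (cs.takeWhile (· ≠ ':') == p) := by
  by_cases hq : cs.takeWhile (· ≠ ':') = p
  · rw [(pv_startswith_colon_iff cs p hp).mpr ⟨hq, hne⟩, hq]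
    simp
  · have hF : PySem.Chars.startswith cs (p ++ [':']) = false :=
      Bool.eq_false_iff.mpr (fun hT => hq ((pv_startswith_colon_iff cs p hp).mp hT).1)
    rw [hF, beq_eq_false_iff_ne.mpr hq]

-- the dict-key test of B, reduced to the same boolean
lemma pv_ofList_append_beq (pre p : List Char) (lit : String) (hlit : lit.toList = p ++ [':']) :
    ((lit == String.ofList (pre ++ [':'])) = (pre == p)) := by
  by_cases h : p = pre
  · subst h
    have : lit = String.ofList (p ++ [':']) := by
      apply String.ext_iff.mpr
      rw [String.toList_ofList, hlit]
    rw [this]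
    simp
  · have hne : lit ≠ String.ofList (pre ++ [':']) := by
      intro e
      apply h
      have := congrArg String.toList e
      rw [hlit, String.toList_ofList] at this
      exact (List.append_left_inj [':']).mp this
    rw [beq_eq_false_iff_ne.mpr hne, beq_eq_false_iff_ne.mpr (fun e => h e.symm)]

-- ===== VERDICT (by name: the statement is the Claim_ definition above) =====

set_option maxHeartbeats 2000000 in
theorem expand_localise_property_py_spec : Claim_equal_expand_localise_property_py := by
  intro prop _
  unfold Spec_expand_localise_property_py expand_localise_property_py expand_localise_property_py_alt
  rcases hd : prop.toList.dropWhile (· ≠ ':') with _ | ⟨c, tail⟩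
  · -- no colon in prop: every startswith is false, B's partition has empty sep
    have neg : ∀ (p : List Char), ':' ∉ p →
        PySem.Chars.startswith prop.toList (p ++ [':']) = false := by
      intro p hp
      rw [Bool.eq_false_iff]
      intro hT
      exact ((pv_startswith_colon_iff prop.toList p hp).mp hT).2 hd
    have e1 := neg ['r','d','f','s'] (by decide)
    have e2 := neg ['s','k','o','s'] (by decide)
    have e3 := neg ['o','w','l'] (by decide)
    have e4 := neg ['r','d','f'] (by decide)
    have e5 := neg ['d','c'] (by decide)
    have e6 := neg ['d','c','t','e','r','m','s'] (by decide)
    simp only [pvPrefixes, pvExpandLoop, PySem.Str.startswith_eq,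
      show ("rdfs:").toList = ['r','d','f','s'] ++ [':'] from rfl,
      show ("skos:").toList = ['s','k','o','s'] ++ [':'] from rfl,
      show ("owl:").toList = ['o','w','l'] ++ [':'] from rfl,
      show ("rdf:").toList = ['r','d','f'] ++ [':'] from rfl,
      show ("dc:").toList = ['d','c'] ++ [':'] from rfl,
      show ("dcterms:").toList = ['d','c','t','e','r','m','s'] ++ [':'] from rfl,
      e1, e2, e3, e4, e5, e6, List.span_eq_takeWhile_dropWhile, hd]
    simp
  · -- a colon exists: both sides are the same test chain on the pre-colon segment
    have hne : prop.toList.dropWhile (· ≠ ':') ≠ [] := by rw [hd]; simp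
    have hc : c = ':' := by
      have h3 := List.head?_dropWhile_not (fun x => decide (x ≠ ':')) prop.toList
      rw [hd] at h3; simpa using h3
    subst hc
    have hsplit : prop.toList.takeWhile (· ≠ ':') ++ ':' :: tail = prop.toList := by
      have := List.takeWhile_append_dropWhile (p := fun x => decide (x ≠ ':')) (l := prop.toList)
      rw [hd] at this; exact this
    have s1 := pv_startswith_eq_beq prop.toList ['r','d','f','s'] (by decide) hne
    have s2 := pv_startswith_eq_beq prop.toList ['s','k','o','s'] (by decide) hne
    have s3 := pv_startswith_eq_beq prop.toList ['o','w','l'] (by decide) hne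
    have s4 := pv_startswith_eq_beq prop.toList ['r','d','f'] (by decide) hne
    have s5 := pv_startswith_eq_beq prop.toList ['d','c'] (by decide) hne
    have s6 := pv_startswith_eq_beq prop.toList ['d','c','t','e','r','m','s'] (by decide) hne
    have k1 := pv_ofList_append_beq (prop.toList.takeWhile (· ≠ ':')) ['r','d','f','s'] "rdfs:" rfl
    have k2 := pv_ofList_append_beq (prop.toList.takeWhile (· ≠ ':')) ['s','k','o','s'] "skos:" rfl
    have k3 := pv_ofList_append_beq (prop.toList.takeWhile (· ≠ ':')) ['o','w','l'] "owl:" rfl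
    have k4 := pv_ofList_append_beq (prop.toList.takeWhile (· ≠ ':')) ['r','d','f'] "rdf:" rfl
    have k5 := pv_ofList_append_beq (prop.toList.takeWhile (· ≠ ':')) ['d','c'] "dc:" rfl
    have k6 := pv_ofList_append_beq (prop.toList.takeWhile (· ≠ ':')) ['d','c','t','e','r','m','s'] "dcterms:" rfl
    simp only [pvPrefixes, pvExpandLoop, PySem.Str.startswith_eq,
      show ("rdfs:").toList = ['r','d','f','s'] ++ [':'] from rfl,
      show ("skos:").toList = ['s','k','o','s'] ++ [':'] from rfl,
      show ("owl:").toList = ['o','w','l'] ++ [':'] from rfl,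
      show ("rdf:").toList = ['r','d','f'] ++ [':'] from rfl,
      show ("dc:").toList = ['d','c'] ++ [':'] from rfl,
      show ("dcterms:").toList = ['d','c','t','e','r','m','s'] ++ [':'] from rfl,
      s1, s2, s3, s4, s5, s6,
      List.span_eq_takeWhile_dropWhile, hd,
      PySem.Dict.get?_mk_cons, k1, k2, k3, k4, k5, k6]
    split_ifs with h1 h2 h3 h4 h5 h6
    · have e := eq_of_beq h1
      have hsl : (PySem.Str.slice prop (some (PySem.Str.len "rdfs:"))).toList = tail := by
        have h0 : (PySem.Str.slice prop (some (PySem.Str.len "rdfs:"))).toList = prop.toList.drop 5 := by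
          simp [pysem]
        rw [h0, ← hsplit, e]; simp
      rw [hsl]
    · have e := eq_of_beq h2
      have hsl : (PySem.Str.slice prop (some (PySem.Str.len "skos:"))).toList = tail := by
        have h0 : (PySem.Str.slice prop (some (PySem.Str.len "skos:"))).toList = prop.toList.drop 5 := by
          simp [pysem]
        rw [h0, ← hsplit, e]; simp
      rw [hsl]
    · have e := eq_of_beq h3
      have hsl : (PySem.Str.slice prop (some (PySem.Str.len "owl:"))).toList = tail := by
        have h0 : (PySem.Str.slice prop (some (PySem.Str.len "owl:"))).toList = prop.toList.drop 4 := by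
          simp [pysem]
        rw [h0, ← hsplit, e]; simp
      rw [hsl]
    · have e := eq_of_beq h4
      have hsl : (PySem.Str.slice prop (some (PySem.Str.len "rdf:"))).toList = tail := by
        have h0 : (PySem.Str.slice prop (some (PySem.Str.len "rdf:"))).toList = prop.toList.drop 4 := by
          simp [pysem]
        rw [h0, ← hsplit, e]; simp
      rw [hsl]
    · have e := eq_of_beq h5
      have hsl : (PySem.Str.slice prop (some (PySem.Str.len "dc:"))).toList = tail := by
        have h0 : (PySem.Str.slice prop (some (PySem.Str.len "dc:"))).toList = prop.toList.drop 3 := by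
          simp [pysem]
        rw [h0, ← hsplit, e]; simp
      rw [hsl]
    · have e := eq_of_beq h6
      have hsl : (PySem.Str.slice prop (some (PySem.Str.len "dcterms:"))).toList = tail := by
        have h0 : (PySem.Str.slice prop (some (PySem.Str.len "dcterms:"))).toList = prop.toList.drop 8 := by
          simp [pysem]
        rw [h0, ← hsplit, e]; simp
      rw [hsl]
    · rfl
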